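-- pv_equiv track=rewrite | github.com/MomorioUHT/AetheriaDomainOfMoonshadowAndStarlight | [Hard]-ArthersLuminousOresConundrum.py | tiltUp
-- ===== SOURCE A (Python) =====
-- def tiltUp(grid: list):
--     for col in range(len(grid[0])):
--         stack = []
--         for row in range(len(grid)):
--             if grid[row][col] != ".":
--                 stack.append(grid[row][col])
--
--         for row in range(len(grid)):
--             grid[row][col] = stack[row] if row < len(stack) else "."
--
--     return grid
-- ===== SOURCE B (Python) =====
-- def tiltUp(grid: list):
--     # In-place two-pointer compaction per column: one pass, no auxiliary stack list.
--     for col in range(len(grid[0])):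
--         fill = 0
--         for row in range(len(grid)):
--             v = grid[row][col]
--             if v != ".":
--                 grid[row][col] = "."
--                 grid[fill][col] = v
--                 fill += 1
--     return grid
-- ===== Notes on version B (the rewrite author's own statement) =====
-- stated objective: alternative
-- what changed: Replaces A's two-pass-per-column scheme (collect non-dot cells into an auxiliary stack list, then a second loop rewriting the whole column) by a single in-place two-pointer pass per column that moves each non-dot cell up to a fill index, needing no auxiliary list and no second loop.
import Mathlib
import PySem

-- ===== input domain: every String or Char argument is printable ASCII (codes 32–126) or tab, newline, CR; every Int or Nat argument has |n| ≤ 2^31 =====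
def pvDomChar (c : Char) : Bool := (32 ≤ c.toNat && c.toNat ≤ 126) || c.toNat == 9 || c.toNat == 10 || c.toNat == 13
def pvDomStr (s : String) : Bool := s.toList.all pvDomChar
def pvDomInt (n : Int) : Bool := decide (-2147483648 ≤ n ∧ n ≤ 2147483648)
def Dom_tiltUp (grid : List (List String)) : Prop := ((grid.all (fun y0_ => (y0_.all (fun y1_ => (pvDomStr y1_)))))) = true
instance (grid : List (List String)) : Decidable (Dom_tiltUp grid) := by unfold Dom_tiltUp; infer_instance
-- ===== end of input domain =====

-- ===== PORT A =====
-- B changes structure only; both A and B mutate `grid` in place in Python (same mutation), the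
-- equivalence proved here is about the returned value. getD stands in for Python indexing; the
-- inputs on which Python raises IndexError (empty grid, a row shorter than row 0) are outside Pre_.
def pvSetCell (g : List (List String)) (row col : Nat) (v : String) : List (List String) :=
  g.set row ((g.getD row []).set col v)

def tiltUp (grid : List (List String)) : List (List String) :=
  (List.range (grid.getD 0 []).length).foldl (fun g col =>
    let stack := (List.range g.length).foldl (fun st row =>
      if (g.getD row []).getD col "." ≠ "." then st ++ [(g.getD row []).getD col "."] else st)
      ([] : List String)
    (List.range g.length).foldl (fun g2 row =>
      pvSetCell g2 row col (if row < stack.length then stack.getD row "." else ".")) g) grid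

-- ===== PORT B =====
def tiltUp_alt (grid : List (List String)) : List (List String) :=
  (List.range (grid.getD 0 []).length).foldl (fun g col =>
    ((List.range g.length).foldl (fun (p : List (List String) × Nat) row =>
      let v := (p.1.getD row []).getD col "."
      if v ≠ "." then (pvSetCell (pvSetCell p.1 row col ".") p.2 col v, p.2 + 1)
      else p) (g, 0)).1) grid

-- ===== PRECONDITION & SPEC =====
-- Pre_ excludes exactly the inputs on which Python A raises IndexError: the empty grid
-- (grid[0] fails) and grids with a row shorter than row 0 (grid[row][col] fails).
def Pre_tiltUp (grid : List (List String)) : Prop :=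
  grid ≠ [] ∧ ∀ r ∈ grid, (grid.headD []).length ≤ r.length
instance (grid : List (List String)) : Decidable (Pre_tiltUp grid) := by
  unfold Pre_tiltUp; infer_instance
def pvWitness_tiltUp : List (List String) := [["a", "."], [".", "b"]]

def Spec_tiltUp (grid : List (List String)) (out : List (List String)) : Prop := out = tiltUp_alt grid
instance (grid : List (List String)) (out : List (List String)) : Decidable (Spec_tiltUp grid out) := by unfold Spec_tiltUp; infer_instance

-- ===== CLAIM (what is proved, stated in full; the proofs are below) =====
def Claim_equal_tiltUp : Prop := ∀ (grid : List (List String)), Dom_tiltUp grid → Pre_tiltUp grid → Spec_tiltUp grid (tiltUp grid)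

-- ===== LEMMAS AND PROOFS =====

-- grid g with column `col` replaced by the entries of d (row i gets d[i])
def pvZC (col : Nat) (g : List (List String)) (d : List String) : List (List String) :=
  List.zipWith (fun r v => r.set col v) g d

def pvColOf (col : Nat) (g : List (List String)) : List String :=
  g.map (fun r => r.getD col ".")

-- pure column-level versions of the three loops
def pvColStack (c : List String) (l : List Nat) (st : List String) : List String :=
  l.foldl (fun st row => if c.getD row "." ≠ "." then st ++ [c.getD row "."] else st) st

def pvColWrite (f : Nat → String) (l : List Nat) (d : List String) : List String :=
  l.foldl (fun d2 row => d2.set row (f row)) d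

def pvColMove (l : List Nat) (p : List String × Nat) : List String × Nat :=
  l.foldl (fun p row =>
    let v := p.1.getD row "."
    if v ≠ "." then ((p.1.set row ".").set p.2 v, p.2 + 1) else p) p

-- the common result of tilting one column
def pvTiltCol (c : List String) : List String :=
  (c.filter fun v => decide (v ≠ ".")) ++
    List.replicate (c.length - (c.filter fun v => decide (v ≠ ".")).length) "."

-- the per-column bodies of the two outer folds
def pvStack (g : List (List String)) (col : Nat) : List String :=
  (List.range g.length).foldl (fun st row =>
    if (g.getD row []).getD col "." ≠ "." then st ++ [(g.getD row []).getD col "."] else st)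
    ([] : List String)

def pvStepA (g : List (List String)) (col : Nat) : List (List String) :=
  (List.range g.length).foldl (fun g2 row =>
    pvSetCell g2 row col (if row < (pvStack g col).length then (pvStack g col).getD row "." else ".")) g

def pvStepB (g : List (List String)) (col : Nat) : List (List String) :=
  ((List.range g.length).foldl (fun (p : List (List String) × Nat) row =>
    let v := (p.1.getD row []).getD col "."
    if v ≠ "." then (pvSetCell (pvSetCell p.1 row col ".") p.2 col v, p.2 + 1)
    else p) (g, 0)).1

lemma tiltUp_eq_fold (grid : List (List String)) :
    tiltUp grid = (List.range (grid.getD 0 []).length).foldl pvStepA grid := rfl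

lemma tiltUp_alt_eq_fold (grid : List (List String)) :
    tiltUp_alt grid = (List.range (grid.getD 0 []).length).foldl pvStepB grid := rfl

lemma colOf_getD (col : Nat) (g : List (List String)) (row : Nat) :
    (pvColOf col g).getD row "." = (g.getD row []).getD col "." := by
  simp only [pvColOf, List.getD_eq_getElem?_getD, List.getElem?_map]
  cases g[row]? <;> simp

lemma zc_self (col : Nat) (g : List (List String)) (hg : ∀ r ∈ g, col < r.length) :
    pvZC col g (pvColOf col g) = g := by
  induction g with
  | nil => rfl
  | cons r g ih =>
      have hr : col < r.length := hg r (by simp)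
      simp only [pvZC, pvColOf, List.map_cons, List.zipWith_cons_cons]
      rw [List.getD_eq_getElem r "." hr, List.set_getElem_self]
      exact congrArg (r :: ·) (ih fun r' h => hg r' (by simp [h]))

lemma set_zc (col : Nat) : ∀ (g : List (List String)) (d : List String) (j : Nat) (v : String),
    d.length = g.length →
    pvSetCell (pvZC col g d) j col v = pvZC col g (d.set j v) := by
  intro g
  induction g with
  | nil => intro d j v hd; simp at hd; subst hd; simp [pvZC, pvSetCell]
  | cons r g ih =>
      intro d j v hd
      cases d with
      | nil => simp at hd
      | cons v0 d =>
          simp at hd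
          cases j with
          | zero =>
              simp [pvZC, pvSetCell, List.set_set]
          | succ j =>
              simp only [pvZC, List.zipWith_cons_cons, pvSetCell, List.getD_cons_succ,
                List.set_cons_succ]
              exact congrArg (_ :: ·) (ih d j v hd)

lemma read_zc (col : Nat) : ∀ (g : List (List String)) (d : List String) (j : Nat),
    d.length = g.length → (∀ r ∈ g, col < r.length) →
    ((pvZC col g d).getD j []).getD col "." = d.getD j "." := by
  intro g
  induction g with
  | nil => intro d j hd _; simp at hd; subst hd; simp [pvZC]
  | cons r g ih =>
      intro d j hd hg
      cases d with
      | nil => simp at hd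
      | cons v0 d =>
          simp at hd
          cases j with
          | zero =>
              have hr : col < r.length := hg r (by simp)
              have : col < (r.set col v0).length := by simpa using hr
              simp only [pvZC, List.zipWith_cons_cons, List.getD_cons_zero]
              rw [List.getD_eq_getElem _ _ this, List.getElem_set_self]
          | succ j =>
              simp only [pvZC, List.zipWith_cons_cons, List.getD_cons_succ]
              exact ih d j hd fun r' h => hg r' (by simp [h])

lemma foldA_sim (col : Nat) (g : List (List String)) (f : Nat → String) :
    ∀ (l : List Nat) (d : List String), d.length = g.length →
    l.foldl (fun g2 row => pvSetCell g2 row col (f row)) (pvZC col g d)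
      = pvZC col g (pvColWrite f l d) := by
  intro l
  induction l with
  | nil => intro d _; rfl
  | cons row l ih =>
      intro d hd
      simp only [List.foldl_cons, pvColWrite] at *
      rw [set_zc col g d row (f row) hd, ih (d.set row (f row)) (by simpa using hd)]

lemma foldB_sim (col : Nat) (g : List (List String)) (hg : ∀ r ∈ g, col < r.length) :
    ∀ (l : List Nat) (d : List String) (fill : Nat), d.length = g.length →
    l.foldl (fun (p : List (List String) × Nat) row =>
        let v := (p.1.getD row []).getD col "."
        if v ≠ "." then (pvSetCell (pvSetCell p.1 row col ".") p.2 col v, p.2 + 1)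
        else p) (pvZC col g d, fill)
      = (pvZC col g (pvColMove l (d, fill)).1, (pvColMove l (d, fill)).2) := by
  intro l
  induction l with
  | nil => intro d fill _; rfl
  | cons row l ih =>
      intro d fill hd
      simp only [List.foldl_cons, pvColMove] at *
      rw [read_zc col g d row hd hg]
      by_cases hv : d.getD row "." ≠ "."
      · rw [if_pos hv, if_pos hv]
        rw [set_zc col g d row "." hd,
          set_zc col g (d.set row ".") fill (d.getD row ".") (by simpa using hd)]
        exact ih ((d.set row ".").set fill (d.getD row ".")) (fill + 1) (by simpa using hd)
      · rw [if_neg hv, if_neg hv]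
        exact ih d fill hd

lemma stack_sim (col : Nat) (g : List (List String)) (l : List Nat) (st : List String) :
    l.foldl (fun st row =>
        if (g.getD row []).getD col "." ≠ "." then st ++ [(g.getD row []).getD col "."] else st) st
      = pvColStack (pvColOf col g) l st := by
  unfold pvColStack
  apply List.foldl_ext
  intro st row _
  rw [colOf_getD]

lemma stack_filter : ∀ (c : List String) (st : List String),
    pvColStack c (List.range c.length) st = st ++ c.filter (fun v => decide (v ≠ ".")) := by
  intro c
  induction c with
  | nil => intro st; simp [pvColStack]
  | cons a c ih =>
      intro st
      rw [pvColStack, List.length_cons, List.range_succ_eq_map, List.foldl_cons, List.foldl_map]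
      simp only [List.getD_cons_zero, Nat.succ_eq_add_one, List.getD_cons_succ]
      rw [show ∀ st0, List.foldl (fun st (row : Nat) =>
          if c.getD row "." ≠ "." then st ++ [c.getD row "."] else st) st0 (List.range c.length)
          = pvColStack c (List.range c.length) st0 from fun _ => rfl, ih]
      by_cases ha : a = "." <;> simp [ha]

lemma write_closed (f : Nat → String) : ∀ (n : Nat) (d : List String), n ≤ d.length →
    pvColWrite f (List.range n) d = (List.range n).map f ++ d.drop n := by
  intro n
  induction n with
  | zero => intro d _; simp [pvColWrite]
  | succ n ih =>
      intro d h
      rw [pvColWrite, List.range_succ, List.foldl_append]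
      rw [show List.foldl (fun d2 (row : Nat) => d2.set row (f row)) d (List.range n)
          = pvColWrite f (List.range n) d from rfl, ih d (by omega)]
      simp only [List.foldl_cons, List.foldl_nil]
      rw [List.set_append]
      simp only [List.length_map, List.length_range, lt_irrefl, if_false, Nat.sub_self]
      conv_lhs => rw [List.drop_eq_getElem_cons (show n < d.length by omega)]
      rw [List.set_cons_zero, List.map_append, List.append_assoc]
      rfl

lemma append_set_right (l1 l2 : List String) (i : Nat) (v : String) (h : l1.length ≤ i) :
    (l1 ++ l2).set i v = l1 ++ l2.set (i - l1.length) v := by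
  rw [List.set_append, if_neg (by omega)]

lemma rep_shift (m : Nat) (X : List String) :
    List.replicate m ("." : String) ++ "." :: X = List.replicate (m + 1) "." ++ X := by
  rw [List.replicate_succ', List.append_assoc, List.singleton_append]

lemma move_closed (xs : List String) : ∀ (k : Nat), k ≤ xs.length →
    pvColMove (List.range k) (xs, 0)
      = (((xs.take k).filter fun v => decide (v ≠ ".")) ++
          (List.replicate (k - ((xs.take k).filter fun v => decide (v ≠ ".")).length) "." ++
          xs.drop k),
         ((xs.take k).filter fun v => decide (v ≠ ".")).length) := by
  intro k
  induction k with
  | zero => intro _; simp [pvColMove]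
  | succ k ih =>
      intro hk
      have hkc : k < xs.length := by omega
      rw [pvColMove, List.range_succ, List.foldl_append]
      rw [show List.foldl (fun (p : List String × Nat) row =>
            let v := p.1.getD row "."
            if v ≠ "." then ((p.1.set row ".").set p.2 v, p.2 + 1) else p) (xs, 0) (List.range k)
          = pvColMove (List.range k) (xs, 0) from rfl, ih (by omega)]
      have hAlen : ((xs.take k).filter fun v => decide (v ≠ ".")).length ≤ k := by
        have h1 := List.length_filter_le (fun v => decide (v ≠ ".")) (xs.take k)
        have h2 : (xs.take k).length = k := by simp [List.length_take]; omega
        omega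
      set A := (xs.take k).filter (fun v => decide (v ≠ ".")) with hA
      set m := k - A.length with hm
      have hread : (A ++ (List.replicate m "." ++ xs.drop k)).getD k "." = xs[k]'hkc := by
        rw [List.getD_eq_getElem?_getD,
          List.getElem?_append_right (by omega : A.length ≤ k),
          List.getElem?_append_right (by simp [List.length_replicate]; omega)]
        simp only [List.length_replicate, List.getElem?_drop]
        rw [show k - A.length - m = 0 from by omega]
        simp [List.getElem?_eq_getElem hkc]
      have htake : (xs.take (k + 1)).filter (fun v => decide (v ≠ "."))
          = A ++ List.filter (fun v => decide (v ≠ ".")) [xs[k]'hkc] := by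
        rw [List.take_add_one, List.getElem?_eq_getElem hkc, Option.toList_some, List.filter_append,
          hA]
      simp only [List.foldl_cons, List.foldl_nil]
      rw [hread]
      by_cases hv : xs[k]'hkc = "."
      · rw [if_neg (by simp [hv])]
        rw [htake, hv]
        rw [show List.filter (fun v => decide (v ≠ ".")) [("." : String)] = [] from by decide,
          List.append_nil]
        have hdrop : xs.drop k = "." :: xs.drop (k + 1) := by
          rw [List.drop_eq_getElem_cons hkc, hv]
        rw [hdrop, rep_shift, show k + 1 - A.length = m + 1 from by omega]
      · rw [if_pos (by simp [hv])]
        rw [htake]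
        rw [show List.filter (fun v => decide (v ≠ ".")) [xs[k]'hkc] = [(xs[k]'hkc)] from by
          simp [hv]]
        have hdrop : xs.drop k = xs[k]'hkc :: xs.drop (k + 1) := List.drop_eq_getElem_cons hkc
        have step1 : (A ++ (List.replicate m "." ++ xs.drop k)).set k "."
            = A ++ (List.replicate (m + 1) "." ++ xs.drop (k + 1)) := by
          rw [append_set_right _ _ _ _ (by omega),
            append_set_right _ _ _ _ (by simp [List.length_replicate]; omega)]
          simp only [List.length_replicate]
          rw [show k - A.length - m = 0 from by omega, hdrop, List.set_cons_zero, rep_shift]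
        have step2 : (A ++ (List.replicate (m + 1) "." ++ xs.drop (k + 1))).set A.length (xs[k]'hkc)
            = (A ++ [(xs[k]'hkc)]) ++ (List.replicate m "." ++ xs.drop (k + 1)) := by
          rw [append_set_right _ _ _ _ (le_refl _), Nat.sub_self, List.replicate_succ,
            List.cons_append, List.set_cons_zero, List.append_assoc, List.singleton_append]
        rw [step1, step2]
        rw [show k + 1 - (A ++ [(xs[k]'hkc)]).length = m from by simp; omega]
        simp

lemma pad_eq : ∀ (s : List String) (n : Nat), s.length ≤ n →
    (List.range n).map (fun row => if row < s.length then s.getD row "." else ".")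
      = s ++ List.replicate (n - s.length) "." := by
  intro s n hs
  apply List.ext_getElem
  · simp; omega
  · intro i h1 h2
    simp only [List.getElem_map, List.getElem_range]
    by_cases hi : i < s.length
    · rw [if_pos hi, List.getD_eq_getElem s "." hi, List.getElem_append_left hi]
    · rw [if_neg hi, List.getElem_append_right (by omega), List.getElem_replicate]

lemma foldA_sim' (col : Nat) (g : List (List String)) (hg : ∀ r ∈ g, col < r.length)
    (f : Nat → String) (l : List Nat) :
    l.foldl (fun g2 row => pvSetCell g2 row col (f row)) g
      = pvZC col g (pvColWrite f l (pvColOf col g)) := by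
  conv_lhs => rw [← zc_self col g hg]
  exact foldA_sim col g f l (pvColOf col g) (by rw [pvColOf, List.length_map])

lemma foldB_sim' (col : Nat) (g : List (List String)) (hg : ∀ r ∈ g, col < r.length)
    (l : List Nat) :
    (l.foldl (fun (p : List (List String) × Nat) row =>
        let v := (p.1.getD row []).getD col "."
        if v ≠ "." then (pvSetCell (pvSetCell p.1 row col ".") p.2 col v, p.2 + 1)
        else p) (g, 0)).1
      = pvZC col g (pvColMove l (pvColOf col g, 0)).1 := by
  conv_lhs => rw [← zc_self col g hg]
  rw [foldB_sim col g hg l (pvColOf col g) 0 (by rw [pvColOf, List.length_map])]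

lemma stack_eq (g : List (List String)) (col : Nat) :
    pvStack g col = (pvColOf col g).filter (fun v => decide (v ≠ ".")) := by
  rw [pvStack, stack_sim col g]
  have h : (List.range g.length) = List.range (pvColOf col g).length := by
    rw [pvColOf, List.length_map]
  rw [h, stack_filter, List.nil_append]

lemma stepA_char (g : List (List String)) (col : Nat) (hg : ∀ r ∈ g, col < r.length) :
    pvStepA g col = pvZC col g (pvTiltCol (pvColOf col g)) := by
  rw [pvStepA, stack_eq,
    foldA_sim' col g hg
      (fun row => if row < ((pvColOf col g).filter (fun v => decide (v ≠ "."))).length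
        then ((pvColOf col g).filter (fun v => decide (v ≠ "."))).getD row "." else ".")
      (List.range g.length)]
  have h : (List.range g.length) = List.range (pvColOf col g).length := by
    rw [pvColOf, List.length_map]
  rw [h, write_closed _ _ _ (le_refl _), List.drop_length, List.append_nil,
    pad_eq _ _ (List.length_filter_le _ _), pvTiltCol]

lemma stepB_char (g : List (List String)) (col : Nat) (hg : ∀ r ∈ g, col < r.length) :
    pvStepB g col = pvZC col g (pvTiltCol (pvColOf col g)) := by
  rw [pvStepB, foldB_sim' col g hg]
  have h : (List.range g.length) = List.range (pvColOf col g).length := by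
    rw [pvColOf, List.length_map]
  rw [h, move_closed _ _ (le_refl _), List.take_length, List.drop_length, List.append_nil,
    pvTiltCol]

lemma zc_row_mem (col : Nat) (g : List (List String)) (d : List String) (r' : List String)
    (h : r' ∈ pvZC col g d) : ∃ r ∈ g, r'.length = r.length := by
  rcases List.mem_iff_getElem.1 h with ⟨i, hi, rfl⟩
  have hig : i < g.length := by
    simp only [pvZC, List.length_zipWith] at hi; omega
  refine ⟨g[i], List.getElem_mem hig, ?_⟩
  simp [pvZC, List.getElem_zipWith]

lemma fold_eq : ∀ (cols : List Nat) (g : List (List String)) (W : Nat),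
    (∀ c ∈ cols, c < W) → (∀ r ∈ g, W ≤ r.length) →
    cols.foldl pvStepA g = cols.foldl pvStepB g := by
  intro cols
  induction cols with
  | nil => intro g W _ _; rfl
  | cons c cols ih =>
      intro g W hc hg
      have hcol : ∀ r ∈ g, c < r.length := fun r hr =>
        lt_of_lt_of_le (hc c (by simp)) (hg r hr)
      have hstep : pvStepA g c = pvStepB g c := by
        rw [stepA_char g c hcol, stepB_char g c hcol]
      have hpres : ∀ r' ∈ pvStepB g c, W ≤ r'.length := by
        intro r' hr'
        rw [stepB_char g c hcol] at hr'
        obtain ⟨r, hr, hlen⟩ := zc_row_mem c g _ r' hr'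
        rw [hlen]; exact hg r hr
      rw [List.foldl_cons, List.foldl_cons, hstep]
      exact ih (pvStepB g c) W (fun c' h => hc c' (by simp [h])) hpres

-- ===== VERDICT (by name: the statement is the Claim_ definition above) =====
theorem tiltUp_spec : Claim_equal_tiltUp := by
  intro grid _ hPre
  obtain ⟨hne, hrows⟩ := hPre
  unfold Spec_tiltUp
  rw [tiltUp_eq_fold, tiltUp_alt_eq_fold]
  have hhead : grid.getD 0 [] = grid.headD [] := by
    cases grid with
    | nil => exact absurd rfl hne
    | cons r g => rfl
  apply fold_eq (List.range (grid.getD 0 []).length) grid ((grid.getD 0 []).length)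
  · intro c hc; exact List.mem_range.1 hc
  · intro r hr; rw [hhead]; exact hrows r hr
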